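-- pv_equiv track=rewrite | github.com/phuthai29062005/CVRP_neural | GA.py | _separate_routes
-- ===== SOURCE A (Python) =====
-- from typing import Any, Dict, List, Optional, Sequence, Set, Tuple
--
-- def _separate_routes(
--     permutation: Sequence[int],
--     route_markers: Sequence[int],
-- ) -> List[List[int]]:
--     """
--     Tách permutation + route markers thành list routes.
--     marker = 1 nghĩa là bắt đầu route mới.
--     """
--     routes = []
--     current_route = []
--
--     for customer, marker in zip(permutation, route_markers):
--         if marker == 1:
--             if current_route:
--                 routes.append(current_route)
--
--             current_route = [customer]
--         else:
--             current_route.append(customer)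
--
--     if current_route:
--         routes.append(current_route)
--
--     return routes
-- ===== SOURCE B (Python) =====
-- def _separate_routes(permutation, route_markers):
--     n = min(len(permutation), len(route_markers))
--     cuts = [0] + [i for i in range(n) if route_markers[i] == 1] + [n]
--     return [list(permutation[a:b]) for a, b in zip(cuts, cuts[1:]) if a < b]
-- ===== Notes on version B (the rewrite author's own statement) =====
-- stated objective: alternative
-- what changed: Replaces A's accumulate-and-flush state machine (current_route buffer emitted on each marker and at the end) with a boundary-index table: collect the positions of marker==1 in the first min(len) elements, then build every route as a slice of permutation between consecutive boundaries.
import Mathlib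
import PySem

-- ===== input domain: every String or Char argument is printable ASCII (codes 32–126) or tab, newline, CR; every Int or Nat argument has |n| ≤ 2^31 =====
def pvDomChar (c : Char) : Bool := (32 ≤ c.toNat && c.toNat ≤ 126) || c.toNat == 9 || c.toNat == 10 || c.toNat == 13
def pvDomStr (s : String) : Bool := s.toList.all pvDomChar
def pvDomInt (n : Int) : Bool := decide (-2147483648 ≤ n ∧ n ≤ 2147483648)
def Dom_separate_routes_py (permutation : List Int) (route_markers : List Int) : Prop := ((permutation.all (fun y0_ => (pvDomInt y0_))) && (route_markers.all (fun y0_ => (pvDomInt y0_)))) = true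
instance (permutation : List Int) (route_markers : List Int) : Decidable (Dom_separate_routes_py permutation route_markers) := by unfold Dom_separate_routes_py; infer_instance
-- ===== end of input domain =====

-- B replaces A's accumulate-and-flush state machine with a boundary-index table plus slicing (alternative decomposition, same cost).

-- ===== PORT A =====
-- loop body of A's 'for customer, marker in zip(...)' with state (routes, current_route)
def pvAStep (s : List (List Int) × List Int) (cm : Int × Int) : List (List Int) × List Int :=
  if cm.2 == 1 then
    ((if s.2.isEmpty then s.1 else s.1 ++ [s.2]), [cm.1])
  else
    (s.1, s.2 ++ [cm.1])

def separate_routes_py (permutation : List Int) (route_markers : List Int) : List (List Int) :=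
  let st := (permutation.zip route_markers).foldl pvAStep ([], [])
  if st.2.isEmpty then st.1 else st.1 ++ [st.2]

-- ===== PORT B =====
-- n = min(len(permutation), len(route_markers)); cuts = [0] + boundary indices + [n]; routes = slices between consecutive cuts.
-- route_markers[i] is ported as pyGetD (exact here: every i drawn from range(n) satisfies 0 ≤ i < len(route_markers)).
def separate_routes_py_alt (permutation : List Int) (route_markers : List Int) : List (List Int) :=
  let n : Int := min (permutation.length : Int) (route_markers.length : Int)
  let cuts : List Int :=
    [0] ++ (PySem.List.pyRange 0 n 1).filter (fun i => PySem.List.pyGetD route_markers i 0 == 1) ++ [n]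
  ((cuts.zip cuts.tail).filter (fun ab => ab.1 < ab.2)).map
    (fun ab => PySem.List.slice permutation (some ab.1) (some ab.2))

-- ===== PRECONDITION & SPEC =====
def Spec_separate_routes_py (permutation : List Int) (route_markers : List Int) (out : List (List Int)) : Prop := out = separate_routes_py_alt permutation route_markers
instance (permutation : List Int) (route_markers : List Int) (out : List (List Int)) : Decidable (Spec_separate_routes_py permutation route_markers out) := by unfold Spec_separate_routes_py; infer_instance

-- ===== CLAIM (what is proved, stated in full; the proofs are below) =====
def Claim_equal_separate_routes_py : Prop := ∀ (permutation : List Int) (route_markers : List Int), Dom_separate_routes_py permutation route_markers → Spec_separate_routes_py permutation route_markers (separate_routes_py permutation route_markers)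

-- ===== LEMMAS AND PROOFS =====

-- (f, rs): f = the elements before the first marker 1, rs = the marker-delimited routes after it
def pvChunk : List (Int × Int) → List Int × List (List Int)
  | [] => ([], [])
  | (c, m) :: ps =>
    let r := pvChunk ps
    if m = 1 then ([], (c :: r.1) :: r.2) else (c :: r.1, r.2)

-- boundary indices among the first n markers, and with the final cut n appended
def pvF (M : List Int) (n : Nat) : List Nat := (List.range n).filter (fun k => M.getD k 0 == 1)
def pvT (M : List Int) (n : Nat) : List Nat := pvF M n ++ [n]

-- slices of P between consecutive entries of the cut list C
def pvSegs (P : List Int) (C : List Nat) : List (List Int) :=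
  ((C.zip C.tail).filter (fun ab => decide (ab.1 < ab.2))).map
    (fun ab => (P.drop ab.1).take (ab.2 - ab.1))

lemma pv_map_tail {α β : Type} (f : α → β) (l : List α) : (l.map f).tail = l.tail.map f := by
  cases l <;> simp

lemma pvA_fold (ps : List (Int × Int)) : ∀ (rs : List (List Int)) (cur : List Int),
    (if (ps.foldl pvAStep (rs, cur)).2.isEmpty then (ps.foldl pvAStep (rs, cur)).1
     else (ps.foldl pvAStep (rs, cur)).1 ++ [(ps.foldl pvAStep (rs, cur)).2]) =
    rs ++ (if cur ++ (pvChunk ps).1 = [] then (pvChunk ps).2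
           else (cur ++ (pvChunk ps).1) :: (pvChunk ps).2) := by
  induction ps with
  | nil =>
    intro rs cur
    cases cur <;> simp [pvChunk]
  | cons cm ps ih =>
    intro rs cur
    obtain ⟨c, m⟩ := cm
    by_cases hm : m = 1
    · simp only [List.foldl_cons, pvAStep, pvChunk, hm, beq_self_eq_true, if_pos]
      rw [ih]
      cases cur <;> simp
    · have hb : (m == 1) = false := by simp [hm]
      simp only [List.foldl_cons, pvAStep, pvChunk, hb, Bool.false_eq_true, if_false, hm]
      rw [ih]
      simp

lemma pvSegs_shift (p : Int) (P : List Int) (C : List Nat) :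
    pvSegs (p :: P) (C.map (· + 1)) = pvSegs P C := by
  unfold pvSegs
  rw [pv_map_tail, List.zip_map, List.filter_map, List.map_map]
  congr 1
  · funext ab
    simp [List.drop_succ_cons]
  · apply List.filter_congr
    intro ab _
    simp
  
lemma pvSegs_cons_cons (P : List Int) (a b : Nat) (C : List Nat) :
    pvSegs P (a :: b :: C) =
      (if a < b then [(P.drop a).take (b - a)] else []) ++ pvSegs P (b :: C) := by
  unfold pvSegs
  by_cases h : a < b <;> simp [h]

lemma pvT_cons (m : Int) (M : List Int) (n : Nat) :
    pvT (m :: M) (n + 1) =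
      if m = 1 then 0 :: (pvT M n).map (· + 1) else (pvT M n).map (· + 1) := by
  unfold pvT pvF
  rw [List.range_succ_eq_map]
  by_cases hm : m = 1
  · simp [hm, List.filter_map, Function.comp_def, Nat.succ_eq_add_one]
  · have hb : (m == 1) = false := by simp [hm]
    simp [hm, hb, List.filter_map, Function.comp_def, Nat.succ_eq_add_one]

lemma pvT_le (M : List Int) (n : Nat) : ∀ x ∈ pvT M n, x ≤ n := by
  intro x hx
  unfold pvT pvF at hx
  rcases List.mem_append.mp hx with h | h
  · exact Nat.le_of_lt (List.mem_range.mp (List.mem_of_mem_filter h))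
  · simp at h; omega

lemma pvT_ne_nil (M : List Int) (n : Nat) : pvT M n ≠ [] := by
  unfold pvT; simp

-- MAIN: the chunk decomposition of the zipped list = "prefix up to first cut" + "slices between the cuts"
lemma pvMain (P : List Int) : ∀ (M : List Int),
    pvChunk (P.zip M) =
      (P.take (pvT M (min P.length M.length)).headI,
       pvSegs P (pvT M (min P.length M.length))) := by
  induction P with
  | nil =>
    intro M
    simp [pvChunk, pvT, pvF, pvSegs]
  | cons p P ih =>
    intro M
    cases M with
    | nil => simp [pvChunk, pvT, pvF, pvSegs]
    | cons m M =>
      have hmin : min (p :: P).length (m :: M).length = min P.length M.length + 1 := by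
        simp [Nat.succ_min_succ]
      rw [hmin, pvT_cons]
      obtain ⟨t0, Trest, hT⟩ : ∃ t0 Trest, pvT M (min P.length M.length) = t0 :: Trest := by
        cases h : pvT M (min P.length M.length) with
        | nil => exact absurd h (pvT_ne_nil _ _)
        | cons a l => exact ⟨a, l, rfl⟩
      have hshift : pvSegs (p :: P) ((t0 :: Trest).map (· + 1)) = pvSegs P (t0 :: Trest) :=
        pvSegs_shift p P (t0 :: Trest)
      by_cases hm : m = 1
      · subst hm
        rw [if_pos rfl, hT]
        show pvChunk ((p, 1) :: P.zip M) = _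
        simp [pvChunk, ih M, hT, pvSegs_cons_cons, List.take_succ_cons, List.headI]
        exact hshift.symm
      · rw [if_neg hm, hT]
        show pvChunk ((p, m) :: P.zip M) = _
        simp [pvChunk, hm, ih M, hT, List.take_succ_cons, List.headI]
        exact hshift.symm

-- transport of the segment construction across the Nat → Int cast used by the port of B
lemma pvSegs_cast (P : List Int) (C : List Nat) :
    ((((C.map (fun k : Nat => (k : Int))).zip (C.map (fun k : Nat => (k : Int))).tail).filter
        (fun ab => ab.1 < ab.2)).map
      (fun ab => PySem.List.slice P (some ab.1) (some ab.2))) = pvSegs P C := by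
  unfold pvSegs
  rw [pv_map_tail, List.zip_map, List.filter_map, List.map_map]
  congr 1
  · funext ab
    simp [PySem.List.slice_natCast]
  · apply List.filter_congr
    intro ab _
    simp

-- B's port, after unfolding the Python primitives, is pvSegs over the cut list 0 :: pvT
lemma pvAlt_eq (P M : List Int) :
    separate_routes_py_alt P M = pvSegs P (0 :: pvT M (min P.length M.length)) := by
  simp only [separate_routes_py_alt]
  have hn : min (P.length : Int) (M.length : Int) = ((min P.length M.length : Nat) : Int) := by
    omega
  rw [hn]
  have hrange : PySem.List.pyRange 0 ((min P.length M.length : Nat) : Int) 1 =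
      (List.range (min P.length M.length)).map (fun k : Nat => (k : Int)) := by
    rw [PySem.List.pyRange_one,
        show (((min P.length M.length : Nat) : Int) - 0).toNat = min P.length M.length by omega]
    simp
  rw [hrange, List.filter_map]
  have hfil : (List.filter ((fun i => PySem.List.pyGetD M i 0 == 1) ∘ fun k : Nat => (k : Int))
      (List.range (min P.length M.length))) = pvF M (min P.length M.length) := by
    unfold pvF
    apply List.filter_congr
    intro k _
    simp [Function.comp]
  rw [hfil]
  have hcuts : ([(0 : Int)] ++ (pvF M (min P.length M.length)).map (fun k : Nat => (k : Int)) ++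
      [((min P.length M.length : Nat) : Int)]) =
      ((0 :: pvT M (min P.length M.length)).map (fun k : Nat => (k : Int))) := by
    simp [pvT]
  rw [hcuts, pvSegs_cast]

-- ===== VERDICT (by name: the statement is the Claim_ definition above) =====
theorem separate_routes_py_spec : Claim_equal_separate_routes_py := by
  unfold Claim_equal_separate_routes_py
  intro P M _
  unfold Spec_separate_routes_py
  simp only [separate_routes_py]
  rw [pvA_fold (P.zip M) [] [], pvAlt_eq, List.nil_append]
  obtain ⟨t0, Trest, hT⟩ : ∃ t0 Trest, pvT M (min P.length M.length) = t0 :: Trest := by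
    cases h : pvT M (min P.length M.length) with
    | nil => exact absurd h (pvT_ne_nil _ _)
    | cons a l => exact ⟨a, l, rfl⟩
  rw [pvMain P M, hT]
  by_cases h0 : 0 < t0
  · have ht0le : t0 ≤ min P.length M.length :=
      pvT_le M (min P.length M.length) t0 (by rw [hT]; simp)
    have hPlen : 0 < P.length := by omega
    have hPne : P.take t0 ≠ [] := by
      intro hcontra
      rcases List.take_eq_nil_iff.mp hcontra with h | h
      · omega
      · rw [h] at hPlen; simp at hPlen
    simp [pvSegs_cons_cons, h0, hPne, List.headI]
  · have ht0 : t0 = 0 := by omega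
    subst ht0
    simp [pvSegs_cons_cons, List.headI]
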